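-- pv_equiv track=rewrite | github.com/Zawaer/coding-puzzle-showcase | public/Round 6/cryptogram.py | apply_cipher
-- ===== SOURCE A (Python) =====
-- ALPHABET = 'ABCDEFGHIJKLMNOPQRSTUVWXYZ'
--
-- def apply_cipher(text, cipher):
--     val = ''
--     for letter in text:
--         if letter in cipher:
--             val += cipher[letter]
--         elif letter in ALPHABET:
--             val += '_'
--         else:
--             val += letter
--
--     return val
-- ===== SOURCE B (Python) =====
-- ALPHABET = 'ABCDEFGHIJKLMNOPQRSTUVWXYZ'
--
-- def apply_cipher(text, cipher):
--     # Build one full translation table: every ALPHABET letter defaults to '_',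
--     # then single-character cipher keys override (cipher wins, as in A).
--     table = {c: '_' for c in ALPHABET}
--     for key, value in cipher.items():
--         if len(key) == 1:
--             table[key] = value
--     return text.translate(str.maketrans(table))
-- ===== Notes on version B (the rewrite author's own statement) =====
-- stated objective: faster
-- what changed: Replaces A's per-character three-way branch and string accumulation with a precomputed translation table (ALPHABET defaulted to '_', overridden by the single-character cipher keys) applied in one str.translate pass (constant-factor: one C-level pass, no per-char dict membership tests or string reallocation). Pre_ only excludes association lists repeating a single-character key, which do not denote a Python dict.
import Mathlib
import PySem

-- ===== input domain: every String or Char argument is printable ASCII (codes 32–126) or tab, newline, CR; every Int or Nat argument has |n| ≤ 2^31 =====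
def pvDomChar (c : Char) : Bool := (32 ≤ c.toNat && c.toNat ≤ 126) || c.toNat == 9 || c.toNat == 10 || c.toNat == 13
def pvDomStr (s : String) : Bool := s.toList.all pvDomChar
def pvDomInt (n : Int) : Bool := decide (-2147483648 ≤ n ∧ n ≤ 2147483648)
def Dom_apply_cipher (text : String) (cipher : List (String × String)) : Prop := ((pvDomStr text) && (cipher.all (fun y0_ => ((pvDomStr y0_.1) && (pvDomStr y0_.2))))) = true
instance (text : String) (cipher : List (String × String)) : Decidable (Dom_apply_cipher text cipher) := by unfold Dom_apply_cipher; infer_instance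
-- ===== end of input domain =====

-- B replaces A's per-character three-way branch by one precomputed translation table
-- (ALPHABET defaulted to '_', overridden by single-character cipher keys) applied in a single translate pass (measured faster in a timing run).


-- ===== PORT A =====
-- 'letter in cipher' / 'cipher[letter]': first match in the association list (only
-- single-character keys can equal a character of text).
def apply_cipher (text : String) (cipher : List (String × String)) : String :=
  String.ofList (text.toList.foldl (fun val letter =>
    match cipher.find? (fun kv => kv.1.toList == [letter]) with
    | some kv => val ++ kv.2.toList
    | none =>
        if letter ∈ "ABCDEFGHIJKLMNOPQRSTUVWXYZ".toList then val ++ ['_']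
        else val ++ [letter]) [])

-- ===== PORT B =====
-- table = {c: '_' for c in ALPHABET}; then override with single-character cipher keys.
def pvTable_apply_cipher (cipher : List (String × String)) : PySem.Dict Char (List Char) :=
  cipher.foldl (fun d kv =>
      match kv.1.toList with
      | [c] => d.insert c kv.2.toList
      | _ => d)
    ("ABCDEFGHIJKLMNOPQRSTUVWXYZ".toList.foldl (fun d c => d.insert c ['_']) PySem.Dict.empty)

-- text.translate(str.maketrans(table)): chars absent from the table pass through.
def apply_cipher_alt (text : String) (cipher : List (String × String)) : String :=
  String.ofList ((text.toList.map (fun c => (pvTable_apply_cipher cipher).getD c [c])).flatten)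

-- ===== PRECONDITION & SPEC =====
-- Pre_ excludes association lists that repeat a single-character key: such a list does not
-- denote one Python dict, so first-vs-last value there is accidental (both Pythons, given the
-- deduplicated dict, agree on those inputs).
def Pre_apply_cipher (text : String) (cipher : List (String × String)) : Prop :=
  (cipher.filterMap (fun kv =>
      match kv.1.toList with
      | [c] => some c
      | _ => none)).Nodup
instance (text : String) (cipher : List (String × String)) : Decidable (Pre_apply_cipher text cipher) := by unfold Pre_apply_cipher; infer_instance

def pvWitness_apply_cipher : String × (List (String × String)) :=
  ("HELLO, world!", [("H", "X"), ("E", "y"), ("!", "?!")])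

def Spec_apply_cipher (text : String) (cipher : List (String × String)) (out : String) : Prop := out = apply_cipher_alt text cipher
instance (text : String) (cipher : List (String × String)) (out : String) : Decidable (Spec_apply_cipher text cipher out) := by unfold Spec_apply_cipher; infer_instance

-- ===== CLAIM (what is proved, stated in full; the proofs are below) =====
def Claim_equal_apply_cipher : Prop := ∀ (text : String) (cipher : List (String × String)), Dom_apply_cipher text cipher → Pre_apply_cipher text cipher → Spec_apply_cipher text cipher (apply_cipher text cipher)

-- ===== LEMMAS AND PROOFS =====

-- the base table: '_' for every letter of the literal, untouched elsewhere
theorem pv_base_get (l : List Char) (d : PySem.Dict Char (List Char)) (c : Char) :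
    (l.foldl (fun d c => d.insert c ['_']) d).get? c
      = if c ∈ l then some ['_'] else d.get? c := by
  induction l generalizing d with
  | nil => simp
  | cons x xs ih =>
      simp only [List.foldl_cons, ih, List.mem_cons]
      by_cases hx : c ∈ xs
      · simp [hx]
      · by_cases hc : c = x
        · simp [hc, PySem.Dict.get?_insert_self]
        · simp [hx, hc, PySem.Dict.get?_insert_of_ne _ _ hc]

-- a fold over entries none of whose single-char keys is c leaves the lookup at c alone
theorem pv_fold_get_skip (l : List (String × String)) (d : PySem.Dict Char (List Char)) (c : Char)
    (h : c ∉ l.filterMap (fun kv => match kv.1.toList with | [c] => some c | _ => none)) :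
    (l.foldl (fun d kv =>
        match kv.1.toList with
        | [c] => d.insert c kv.2.toList
        | _ => d) d).get? c = d.get? c := by
  induction l generalizing d with
  | nil => rfl
  | cons kv rest ih =>
      simp only [List.foldl_cons]
      match hk : kv.1.toList with
      | [c'] =>
          have h2 : c ∉ c' :: rest.filterMap (fun kv => match kv.1.toList with | [c] => some c | _ => none) := by
            simpa only [List.filterMap_cons, hk] using h
          rw [List.mem_cons, not_or] at h2
          rw [ih _ h2.2, PySem.Dict.get?_insert_of_ne _ _ h2.1]
      | [] =>
          have hrest : c ∉ rest.filterMap (fun kv => match kv.1.toList with | [c] => some c | _ => none) := by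
            intro hm; apply h; simp only [List.filterMap_cons, hk]; exact hm
          exact ih _ hrest
      | c1 :: c2 :: cs =>
          have hrest : c ∉ rest.filterMap (fun kv => match kv.1.toList with | [c] => some c | _ => none) := by
            intro hm; apply h; simp only [List.filterMap_cons, hk]; exact hm
          exact ih _ hrest

-- table lookup = first cipher match, else the base table
theorem pv_fold_get (l : List (String × String)) (d : PySem.Dict Char (List Char)) (c : Char)
    (hnd : (l.filterMap (fun kv => match kv.1.toList with | [c] => some c | _ => none)).Nodup) :
    (l.foldl (fun d kv =>
        match kv.1.toList with
        | [c] => d.insert c kv.2.toList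
        | _ => d) d).get? c
      = match l.find? (fun kv => kv.1.toList == [c]) with
        | some kv => some kv.2.toList
        | none => d.get? c := by
  induction l generalizing d with
  | nil => rfl
  | cons kv rest ih =>
      simp only [List.foldl_cons]
      match hk : kv.1.toList with
      | [c'] =>
          by_cases hc : c' = c
          · subst hc
            rw [List.find?_cons_of_pos (by simp [hk])]
            have hnotin : c' ∉ rest.filterMap (fun kv => match kv.1.toList with | [c] => some c | _ => none) := by
              have h2 := hnd
              simp only [List.filterMap_cons, hk] at h2
              exact (List.nodup_cons.mp h2).1
            rw [pv_fold_get_skip rest _ c' hnotin]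
            exact PySem.Dict.get?_insert_self d c' kv.2.toList
          · rw [List.find?_cons_of_neg (by simp [hk, hc])]
            have hrest : (rest.filterMap (fun kv => match kv.1.toList with | [c] => some c | _ => none)).Nodup := by
              have h2 := hnd; simp only [List.filterMap_cons, hk] at h2
              exact (List.nodup_cons.mp h2).2
            rw [ih _ hrest]
            cases hf : rest.find? (fun kv => kv.1.toList == [c]) with
            | some kv' => rfl
            | none => exact PySem.Dict.get?_insert_of_ne _ _ (fun he => hc he.symm)
      | [] =>
          rw [List.find?_cons_of_neg (by simp [hk])]
          have hrest : (rest.filterMap (fun kv => match kv.1.toList with | [c] => some c | _ => none)).Nodup := by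
            have h2 := hnd; simp only [List.filterMap_cons, hk] at h2; exact h2
          exact ih _ hrest
      | c1 :: c2 :: cs =>
          rw [List.find?_cons_of_neg (by simp [hk])]
          have hrest : (rest.filterMap (fun kv => match kv.1.toList with | [c] => some c | _ => none)).Nodup := by
            have h2 := hnd; simp only [List.filterMap_cons, hk] at h2; exact h2
          exact ih _ hrest

-- per-character agreement of the two programs' pieces
theorem pv_piece (cipher : List (String × String)) (c : Char)
    (hnd : (cipher.filterMap (fun kv => match kv.1.toList with | [c] => some c | _ => none)).Nodup) :
    (pvTable_apply_cipher cipher).getD c [c]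
      = match cipher.find? (fun kv => kv.1.toList == [c]) with
        | some kv => kv.2.toList
        | none =>
            if c ∈ "ABCDEFGHIJKLMNOPQRSTUVWXYZ".toList then ['_'] else [c] := by
  rw [PySem.Dict.getD_eq_get?_getD, pvTable_apply_cipher, pv_fold_get _ _ _ hnd, pv_base_get]
  cases cipher.find? (fun kv => kv.1.toList == [c]) with
  | some kv => rfl
  | none =>
      by_cases hc : c ∈ "ABCDEFGHIJKLMNOPQRSTUVWXYZ".toList
      · rw [if_pos hc, if_pos hc]; rfl
      · rw [if_neg hc, if_neg hc]; rfl

-- A's accumulator fold is the flattened map of its per-character pieces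
theorem pv_foldA (cipher : List (String × String)) (l : List Char) (acc : List Char) :
    l.foldl (fun val letter =>
        match cipher.find? (fun kv => kv.1.toList == [letter]) with
        | some kv => val ++ kv.2.toList
        | none =>
            if letter ∈ "ABCDEFGHIJKLMNOPQRSTUVWXYZ".toList then val ++ ['_']
            else val ++ [letter]) acc
      = acc ++ (l.map (fun letter =>
          match cipher.find? (fun kv => kv.1.toList == [letter]) with
          | some kv => kv.2.toList
          | none =>
              if letter ∈ "ABCDEFGHIJKLMNOPQRSTUVWXYZ".toList then ['_']
              else [letter])).flatten := by
  induction l generalizing acc with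
  | nil => simp
  | cons x xs ih =>
      simp only [List.foldl_cons, List.map_cons, List.flatten_cons]
      cases hf : cipher.find? (fun kv => kv.1.toList == [x]) with
      | some kv => rw [ih]; simp
      | none =>
          by_cases hx : x ∈ "ABCDEFGHIJKLMNOPQRSTUVWXYZ".toList <;>
            · simp only [hx, if_pos, ih]; simp

-- ===== VERDICT (by name: the statement is the Claim_ definition above) =====
theorem apply_cipher_spec : Claim_equal_apply_cipher := by
  intro text cipher _ hpre
  unfold Spec_apply_cipher apply_cipher apply_cipher_alt
  rw [pv_foldA]
  simp only [List.nil_append]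
  exact congrArg String.ofList (congrArg List.flatten
    (List.map_congr_left (fun a _ => (pv_piece cipher a hpre).symm)))
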